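-- pv_equiv track=rewrite | github.com/flaviavs-commits/projeto-automacao | app/api/routes/webhooks_evolution.py | _normalize_whatsapp_phone_number_candidate
-- ===== SOURCE A (Python) =====
-- _WHATSAPP_NUMERIC_JID_SUFFIXES = ("@s.whatsapp.net", "@c.us")
--
-- _WHATSAPP_LID_SUFFIX = "@lid"
--
-- def _normalize_whatsapp_jid(value: str) -> str:
--     raw_value = str(value or "").strip()
--     if not raw_value:
--         return ""
--
--     lowered = raw_value.lower()
--     for suffix in _WHATSAPP_NUMERIC_JID_SUFFIXES:
--         if lowered.endswith(suffix):
--             normalized = raw_value[: -len(suffix)]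
--             digits = "".join(ch for ch in normalized if ch.isdigit())
--             return digits or normalized
--
--     if lowered.endswith(_WHATSAPP_LID_SUFFIX):
--         normalized = raw_value[: -len(_WHATSAPP_LID_SUFFIX)]
--         digits = "".join(ch for ch in normalized if ch.isdigit())
--         return f"{digits}{_WHATSAPP_LID_SUFFIX}" if digits else lowered
--
--     if "@" in lowered:
--         return lowered
--
--     digits = "".join(ch for ch in raw_value if ch.isdigit())
--     return digits or raw_value
--
-- def _normalize_whatsapp_phone_number_candidate(value: str | None) -> str | None:
--     normalized = _normalize_whatsapp_jid(str(value or "").strip())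
--     if not normalized:
--         return None
--     if normalized.endswith(_WHATSAPP_LID_SUFFIX) or "@" in normalized:
--         return None
--     digits = "".join(ch for ch in normalized if ch.isdigit())
--     return digits or None
-- ===== SOURCE B (Python) =====
-- _WHATSAPP_NUMERIC_JID_SUFFIXES = ("@s.whatsapp.net", "@c.us")
--
--
-- def _normalize_whatsapp_phone_number_candidate(value):
--     # One pass: no intermediate normalized-JID string is ever built.
--     s = str(value or "").strip()
--     if not s:
--         return None
--     lowered = s.lower()
--     for suffix in _WHATSAPP_NUMERIC_JID_SUFFIXES:
--         if lowered.endswith(suffix):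
--             digits = "".join(ch for ch in s[: -len(suffix)] if ch.isdigit())
--             return digits or None
--     if "@" in lowered:
--         return None
--     digits = "".join(ch for ch in s if ch.isdigit())
--     return digits or None
-- ===== Notes on version B (the rewrite author's own statement) =====
-- stated objective: simpler
-- what changed: B inlines the two-stage pipeline (_normalize_whatsapp_jid then candidate filtering) into a single direct case analysis that never builds the intermediate normalized-JID string (no '@lid' rebuild, no lowercased passthrough, no second digit-filtering pass).
import Mathlib
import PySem

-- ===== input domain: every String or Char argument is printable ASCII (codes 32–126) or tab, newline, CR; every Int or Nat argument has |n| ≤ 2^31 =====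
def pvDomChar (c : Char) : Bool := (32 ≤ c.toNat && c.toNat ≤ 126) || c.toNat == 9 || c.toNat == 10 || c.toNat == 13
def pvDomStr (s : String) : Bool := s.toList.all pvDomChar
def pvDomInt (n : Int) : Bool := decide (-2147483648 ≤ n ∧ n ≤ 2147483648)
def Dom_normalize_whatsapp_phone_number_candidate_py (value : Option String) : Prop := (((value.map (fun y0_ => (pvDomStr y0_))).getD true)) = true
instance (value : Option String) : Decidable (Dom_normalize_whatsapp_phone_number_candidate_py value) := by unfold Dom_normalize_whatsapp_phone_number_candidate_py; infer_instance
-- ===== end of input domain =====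

-- B inlines the JID normalization and the candidate filtering into one direct case analysis,
-- never building the intermediate normalized-JID string (objective: simpler decomposition).


-- ===== PORT A =====
def pvSuffixNet : List Char := "@s.whatsapp.net".toList
def pvSuffixCus : List Char := "@c.us".toList
def pvSuffixLid : List Char := "@lid".toList

-- "".join(ch for ch in cs if ch.isdigit())
def pvDigitsOf (cs : List Char) : List Char := cs.filter PySem.Chars.isdigit

-- port of _normalize_whatsapp_jid (on the argument's char list; the for-loop over the two
-- numeric suffixes is unrolled into the two tests in tuple order)
def pvJid (value : List Char) : List Char :=
  let raw := PySem.Chars.strip value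
  if raw = [] then []
  else
    let lowered := PySem.Chars.lower raw
    if PySem.Chars.endswith lowered pvSuffixNet then
      let normalized := PySem.List.slice raw none (some (-15))
      let digits := pvDigitsOf normalized
      if digits = [] then normalized else digits
    else if PySem.Chars.endswith lowered pvSuffixCus then
      let normalized := PySem.List.slice raw none (some (-5))
      let digits := pvDigitsOf normalized
      if digits = [] then normalized else digits
    else if PySem.Chars.endswith lowered pvSuffixLid then
      let normalized := PySem.List.slice raw none (some (-4))
      let digits := pvDigitsOf normalized
      if digits = [] then lowered else digits ++ pvSuffixLid
    else if PySem.Chars.isIn ['@'] lowered then lowered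
    else
      let digits := pvDigitsOf raw
      if digits = [] then raw else digits

def normalize_whatsapp_phone_number_candidate_py (value : Option String) : Option String :=
  let normalized := pvJid (PySem.Chars.strip (value.getD "").toList)
  if normalized = [] then none
  else if PySem.Chars.endswith normalized pvSuffixLid || PySem.Chars.isIn ['@'] normalized then none
  else
    let digits := pvDigitsOf normalized
    if digits = [] then none else some (String.ofList digits)

-- ===== PORT B =====
-- 'digits or None' on the digit characters of cs
def pvDigitsOrNone (cs : List Char) : Option String :=
  let digits := cs.filter PySem.Chars.isdigit
  if digits = [] then none else some (String.ofList digits)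

def normalize_whatsapp_phone_number_candidate_py_alt (value : Option String) : Option String :=
  let s := PySem.Chars.strip (value.getD "").toList
  if s = [] then none
  else
    let lowered := PySem.Chars.lower s
    if PySem.Chars.endswith lowered pvSuffixNet then
      pvDigitsOrNone (PySem.List.slice s none (some (-15)))
    else if PySem.Chars.endswith lowered pvSuffixCus then
      pvDigitsOrNone (PySem.List.slice s none (some (-5)))
    else if PySem.Chars.isIn ['@'] lowered then none
    else pvDigitsOrNone s

-- ===== PRECONDITION & SPEC =====
def Spec_normalize_whatsapp_phone_number_candidate_py (value : Option String) (out : Option String) : Prop := out = normalize_whatsapp_phone_number_candidate_py_alt value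
instance (value : Option String) (out : Option String) : Decidable (Spec_normalize_whatsapp_phone_number_candidate_py value out) := by unfold Spec_normalize_whatsapp_phone_number_candidate_py; infer_instance

-- ===== CLAIM (what is proved, stated in full; the proofs are below) =====
def Claim_equal_normalize_whatsapp_phone_number_candidate_py : Prop := ∀ (value : Option String), Dom_normalize_whatsapp_phone_number_candidate_py value → Spec_normalize_whatsapp_phone_number_candidate_py value (normalize_whatsapp_phone_number_candidate_py value)

-- ===== LEMMAS AND PROOFS =====

theorem pv_strip_idem (s : List Char) :
    PySem.Chars.strip (PySem.Chars.strip s) = PySem.Chars.strip s := by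
  simp only [PySem.Chars.strip, PySem.Chars.lstrip, PySem.Chars.rstrip]
  set p := PySem.Chars.isspace
  have hpref : (List.dropWhile p (List.dropWhile p s).reverse).reverse <+: List.dropWhile p s := by
    have : List.dropWhile p (List.dropWhile p s).reverse <:+ (List.dropWhile p s).reverse :=
      List.dropWhile_suffix p
    simpa using this.reverse
  have h1 : List.dropWhile p ((List.dropWhile p (List.dropWhile p s).reverse).reverse) =
      (List.dropWhile p (List.dropWhile p s).reverse).reverse := by
    rw [List.dropWhile_eq_self_iff]
    intro hl
    have hd : (List.dropWhile p s).length > 0 := lt_of_lt_of_le hl hpref.length_le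
    have := List.dropWhile_eq_self_iff.mp (List.dropWhile_idempotent p s) hd
    have hget := List.IsPrefix.getElem hpref hl
    rw [hget]; exact this
  rw [h1, List.reverse_reverse, List.dropWhile_idempotent]

-- '@' occurs in the digit string never
theorem pv_at_not_mem_digits (cs : List Char) : '@' ∉ List.filter PySem.Chars.isdigit cs := by
  intro h
  have := List.of_mem_filter h
  simp [PySem.Chars.isdigit] at this

theorem pv_isIn_at_iff (l : List Char) : PySem.Chars.isIn ['@'] l = true ↔ '@' ∈ l := by
  rw [PySem.Chars.isIn_iff_infix]
  constructor
  · intro h; exact h.mem (by simp)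
  · intro h
    obtain ⟨t1, t2, rfl⟩ := List.append_of_mem h
    exact ⟨t1, t2, by simp⟩

theorem pv_endswith_lid_mem {l : List Char} (h : PySem.Chars.endswith l pvSuffixLid = true) :
    '@' ∈ l := by
  rw [PySem.Chars.endswith_iff] at h
  exact h.mem (by simp [pvSuffixLid])

-- the digit string never ends with @lid, never contains '@'
theorem pv_digits_no_lid (cs : List Char) :
    PySem.Chars.endswith (List.filter PySem.Chars.isdigit cs) pvSuffixLid = false := by
  by_contra h
  have h' : PySem.Chars.endswith (List.filter PySem.Chars.isdigit cs) pvSuffixLid = true := by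
    revert h; cases PySem.Chars.endswith (List.filter PySem.Chars.isdigit cs) pvSuffixLid <;> simp
  exact pv_at_not_mem_digits cs (pv_endswith_lid_mem h')

theorem pv_digits_no_at (cs : List Char) :
    PySem.Chars.isIn ['@'] (List.filter PySem.Chars.isdigit cs) = false := by
  by_contra h
  have h' : PySem.Chars.isIn ['@'] (List.filter PySem.Chars.isdigit cs) = true := by
    revert h; cases PySem.Chars.isIn ['@'] (List.filter PySem.Chars.isdigit cs) <;> simp
  exact pv_at_not_mem_digits cs ((pv_isIn_at_iff _).mp h')

-- lowering fixes '@lid' and preserves suffixes / membership of '@'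
theorem pv_lid_suffix_lower {s : List Char} (h : PySem.Chars.endswith s pvSuffixLid = true) :
    PySem.Chars.endswith (PySem.Chars.lower s) pvSuffixLid = true := by
  rw [PySem.Chars.endswith_iff] at h ⊢
  have := h.map PySem.Chars.lowerChar
  simpa [PySem.Chars.lower, pvSuffixLid, PySem.Chars.lowerChar] using this

theorem pv_at_mem_lower {s : List Char} (h : '@' ∈ s) : '@' ∈ PySem.Chars.lower s := by
  simp only [PySem.Chars.lower, List.mem_map]
  exact ⟨'@', h, by decide⟩

theorem pv_main (value : Option String) :
    normalize_whatsapp_phone_number_candidate_py value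
      = normalize_whatsapp_phone_number_candidate_py_alt value := by
  unfold normalize_whatsapp_phone_number_candidate_py normalize_whatsapp_phone_number_candidate_py_alt pvJid
  rw [pv_strip_idem]
  set s := PySem.Chars.strip (value.getD "").toList with hs
  by_cases h0 : s = []
  · simp [h0]
  · simp only [if_neg h0]
    set lowered := PySem.Chars.lower s with hlow
    by_cases h1 : PySem.Chars.endswith lowered pvSuffixNet = true
    · simp only [h1, if_true]
      set nm := PySem.List.slice s none (some (-15)) with hnm
      by_cases hd : List.filter PySem.Chars.isdigit nm = []
      · have hd' : ∀ a ∈ nm, PySem.Chars.isdigit a = false := by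
          simpa using hd
        have hT := eq_true hd'
        by_cases hn : nm = []
        · simp [pvDigitsOf, pvDigitsOrNone, hn]
        · simp [pvDigitsOf, pvDigitsOrNone, hT, hn]
      · simp [pvDigitsOf, pvDigitsOrNone, hd, pv_digits_no_lid, pv_digits_no_at,
          List.filter_filter]
    · simp only [if_neg h1]
      by_cases h2 : PySem.Chars.endswith lowered pvSuffixCus = true
      · simp only [h2, if_true]
        set nm := PySem.List.slice s none (some (-5)) with hnm
        by_cases hd : List.filter PySem.Chars.isdigit nm = []
        · have hd' : ∀ a ∈ nm, PySem.Chars.isdigit a = false := by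
            simpa using hd
          have hT := eq_true hd'
          by_cases hn : nm = []
          · simp [pvDigitsOf, pvDigitsOrNone, hn]
          · simp [pvDigitsOf, pvDigitsOrNone, hT, hn]
        · simp [pvDigitsOf, pvDigitsOrNone, hd, pv_digits_no_lid, pv_digits_no_at,
            List.filter_filter]
      · simp only [if_neg h2]
        by_cases h3 : PySem.Chars.endswith lowered pvSuffixLid = true
        · -- everything A's jid can return here ends with @lid or contains '@': candidate → none
          simp only [h3, if_true]
          have hatlow : PySem.Chars.isIn ['@'] lowered = true :=
            (pv_isIn_at_iff _).mpr (pv_endswith_lid_mem h3)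
          simp only [hatlow, if_true]
          by_cases hd : List.filter PySem.Chars.isdigit (PySem.List.slice s none (some (-4))) = []
          · have hd' : ∀ a ∈ PySem.List.slice s none (some (-4)), PySem.Chars.isdigit a = false := by
              simpa using hd
            have hT := eq_true hd'
            simp [pvDigitsOf, hT, h3]
          · have hlid : PySem.Chars.endswith
                (List.filter PySem.Chars.isdigit (PySem.List.slice s none (some (-4)))
                  ++ pvSuffixLid) pvSuffixLid = true := by
              rw [PySem.Chars.endswith_iff]; exact List.suffix_append _ _
            have hFn : (∀ a ∈ PySem.List.slice s none (some (-4)), PySem.Chars.isdigit a = false) = False :=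
              eq_false (by simpa using hd)
            simp [pvDigitsOf, hFn, hlid]
        · simp only [if_neg h3]
          by_cases h4 : PySem.Chars.isIn ['@'] lowered = true
          · simp [h4]
          · simp only [if_neg h4]
            by_cases hd : List.filter PySem.Chars.isdigit s = []
            · -- A's jid returns s itself; it has no '@' and no @lid suffix (else lowered would)
              have hd' : ∀ a ∈ s, PySem.Chars.isdigit a = false := by simpa using hd
              have hlid : PySem.Chars.endswith s pvSuffixLid = false := by
                by_contra hc
                have hc' : PySem.Chars.endswith s pvSuffixLid = true := by
                  revert hc; cases PySem.Chars.endswith s pvSuffixLid <;> simp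
                exact h3 (pv_lid_suffix_lower hc')
              have hat : PySem.Chars.isIn ['@'] s = false := by
                by_contra hc
                have hc' : PySem.Chars.isIn ['@'] s = true := by
                  revert hc; cases PySem.Chars.isIn ['@'] s <;> simp
                exact h4 ((pv_isIn_at_iff _).mpr (pv_at_mem_lower ((pv_isIn_at_iff _).mp hc')))
              have hT := eq_true hd'
              simp [pvDigitsOf, pvDigitsOrNone, hT, h0, hlid, hat]
            · simp [pvDigitsOf, pvDigitsOrNone, hd, pv_digits_no_lid, pv_digits_no_at,
                List.filter_filter]

-- ===== VERDICT (by name: the statement is the Claim_ definition above) =====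
theorem normalize_whatsapp_phone_number_candidate_py_spec : Claim_equal_normalize_whatsapp_phone_number_candidate_py := by
  intro value _
  unfold Spec_normalize_whatsapp_phone_number_candidate_py
  exact pv_main value
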